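-- pv_equiv track=rewrite | github.com/NicoKNL/coding-problems | problems/advent-of-code/2023/09/sol1.py | getFinalDeltas
-- ===== SOURCE A (Python) =====
-- def getFinalDeltas(nums: list[int]) -> list[int]:
--     deltas = []
--     while any(nums):
--         next_nums = []
--
--         for i in range(len(nums) - 1):
--             a = nums[i]
--             b = nums[i + 1]
--             next_nums.append(b - a)
--
--         deltas.append(next_nums[-1])
--         nums = next_nums
--
--     return deltas
-- ===== SOURCE B (Python) =====
-- def getFinalDeltas(nums: list[int]) -> list[int]:
--     # Direct recursion on the finite-difference recurrence instead of A's
--     # imperative shrinking while-loop with an accumulator.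
--     if not any(nums):
--         return []
--     diff = [b - a for a, b in zip(nums, nums[1:])]
--     return [diff[-1]] + getFinalDeltas(diff)
-- ===== Notes on version B (the rewrite author's own statement) =====
-- stated objective: simpler
-- what changed: Replaces A's imperative shrinking while-loop with index bookkeeping and an accumulator by direct structural recursion on the finite-difference recurrence, consing each row's last delta onto the recursive result.
import Mathlib
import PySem

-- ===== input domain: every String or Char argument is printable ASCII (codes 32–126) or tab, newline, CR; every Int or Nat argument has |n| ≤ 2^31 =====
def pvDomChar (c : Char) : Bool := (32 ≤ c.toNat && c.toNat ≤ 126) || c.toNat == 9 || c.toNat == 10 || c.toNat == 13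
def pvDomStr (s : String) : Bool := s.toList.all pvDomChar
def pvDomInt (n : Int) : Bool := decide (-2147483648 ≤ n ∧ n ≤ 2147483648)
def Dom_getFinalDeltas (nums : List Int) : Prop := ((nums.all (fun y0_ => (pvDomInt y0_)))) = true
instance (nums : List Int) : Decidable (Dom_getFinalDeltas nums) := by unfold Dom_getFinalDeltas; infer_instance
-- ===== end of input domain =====

-- B replaces A's imperative shrinking while-loop + accumulator by direct structural
-- recursion on the finite-difference recurrence (objective: simpler).

-- ===== PORT A =====
-- the while-loop of A: state = (nums, deltas); each iteration builds next_nums and appends next_nums[-1]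
def getFinalDeltasLoop (nums : List Int) (deltas : List Int) : List Int :=
  if nums.any (fun x => x ≠ 0) then
    let next :=
      (PySem.List.pyRange 0 ((nums.length : Int) - 1) 1).foldl
        (fun acc i =>
          acc ++ [PySem.List.pyGetD nums (i + 1) 0 - PySem.List.pyGetD nums i 0]) []
    match PySem.List.pyGet? next (-1) with
    | none => deltas            -- Python: next_nums[-1] raises IndexError here (outside Pre_)
    | some x => getFinalDeltasLoop next (deltas ++ [x])
  else deltas
termination_by nums.length
decreasing_by
  · simp only [PySem.List.foldl_append_singleton_eq_map, List.nil_append, List.length_map,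
      PySem.List.length_pyRange_one]
    have hne : nums ≠ [] := by
      rcases List.any_eq_true.mp (by assumption) with ⟨x, hx, _⟩
      exact List.ne_nil_of_mem hx
    have : 1 ≤ nums.length := List.length_pos_iff.mpr hne
    omega

def getFinalDeltas (nums : List Int) : List Int := getFinalDeltasLoop nums []

-- ===== PORT B =====
def getFinalDeltas_alt (nums : List Int) : List Int :=
  if nums.any (fun x => x ≠ 0) = false then []
  else
    let diff := (nums.zip (PySem.List.slice nums (some 1) none)).map (fun p => p.2 - p.1)
    match PySem.List.pyGet? diff (-1) with
    | none => []                -- Python: diff[-1] raises IndexError here (outside Pre_)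
    | some x => x :: getFinalDeltas_alt diff
termination_by nums.length
decreasing_by
  · have hany : nums.any (fun x => decide (x ≠ 0)) = true := by
      cases hb : nums.any (fun x => decide (x ≠ 0)) with
      | false => exact absurd hb (by assumption)
      | true => rfl
    have hne : nums ≠ [] := by
      rcases List.any_eq_true.mp hany with ⟨x, hx, _⟩
      exact List.ne_nil_of_mem hx
    have : 1 ≤ nums.length := List.length_pos_iff.mpr hne
    simp only [List.length_map, List.length_zip, PySem.List.slice_from_one, List.length_tail]
    omega

-- ===== PRECONDITION & SPEC =====
-- one finite-difference step (the mathematical operator, used only to state Pre_)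
def diffStep (l : List Int) : List Int := List.zipWith (fun a b => b - a) l l.tail

-- Pre_ excludes exactly the inputs on which Python A raises IndexError: those where the
-- iterated finite-difference sequence shrinks to a single nonzero value before any
-- all-zero row appears (e.g. [5]).  On such inputs B raises the same IndexError.
def Pre_getFinalDeltas (nums : List Int) : Prop :=
  nums = [] ∨ ∃ k ∈ List.range nums.length, ∀ x ∈ diffStep^[k] nums, x = 0
instance (nums : List Int) : Decidable (Pre_getFinalDeltas nums) := by
  unfold Pre_getFinalDeltas; infer_instance

def pvWitness_getFinalDeltas : List Int := [1, 3, 6, 10]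

def Spec_getFinalDeltas (nums : List Int) (out : List Int) : Prop := out = getFinalDeltas_alt nums
instance (nums : List Int) (out : List Int) : Decidable (Spec_getFinalDeltas nums out) := by unfold Spec_getFinalDeltas; infer_instance

-- ===== CLAIM (what is proved, stated in full; the proofs are below) =====
def Claim_equal_getFinalDeltas : Prop := ∀ (nums : List Int), Dom_getFinalDeltas nums → Pre_getFinalDeltas nums → Spec_getFinalDeltas nums (getFinalDeltas nums)

-- ===== LEMMAS AND PROOFS =====

-- B's zip/map comprehension computes the finite-difference step
lemma diff_zip_eq (l : List Int) :
    (l.zip (PySem.List.slice l (some 1) none)).map (fun p => p.2 - p.1)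
      = List.zipWith (fun a b => b - a) l l.tail := by
  simp [PySem.List.slice_from_one, List.zip]

-- A's indexed inner loop computes the same finite-difference step
lemma diff_range_eq (l : List Int) (h : l ≠ []) :
    (PySem.List.pyRange 0 ((l.length : Int) - 1) 1).foldl
        (fun acc i =>
          acc ++ [PySem.List.pyGetD l (i + 1) 0 - PySem.List.pyGetD l i 0]) []
      = List.zipWith (fun a b => b - a) l l.tail := by
  rw [PySem.List.foldl_append_singleton_eq_map]
  have h1 : 1 ≤ l.length := List.length_pos_iff.mpr h
  have hc : ((l.length : Int) - 1) = ((l.length - 1 : Nat) : Int) := by omega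
  rw [List.nil_append, hc, PySem.List.pyRange_zero_natCast, List.map_map]
  have key : ∀ (m : List Int),
      (List.range (m.length - 1)).map
        (fun i => m.getD (i + 1) 0 - m.getD i 0) = List.zipWith (fun a b => b - a) m m.tail := by
    intro m
    induction m with
    | nil => rfl
    | cons a t ih =>
      cases t with
      | nil => rfl
      | cons b t' =>
        have hlen : (a :: b :: t').length - 1 = (b :: t').length - 1 + 1 := rfl
        rw [hlen, List.range_succ_eq_map, List.map_cons, List.map_map]
        simp only [List.tail_cons, List.zipWith_cons_cons, List.getD_cons_succ,
          List.getD_cons_zero]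
        exact congrArg (List.cons (b - a)) (by simpa using ih)
  rw [← key l]
  apply List.map_congr_left
  intro i _
  have h2 : ((i : Int) + 1) = ((i + 1 : Nat) : Int) := by push_cast; ring
  show PySem.List.pyGetD l ((i : Int) + 1) 0 - PySem.List.pyGetD l (i : Int) 0 = _
  rw [h2, PySem.List.pyGetD_natCast, PySem.List.pyGetD_natCast]

-- the loop of A, run from any accumulator, is the accumulator followed by B's result
lemma loop_eq_alt (nums deltas : List Int) :
    getFinalDeltasLoop nums deltas = deltas ++ getFinalDeltas_alt nums := by
  rw [getFinalDeltasLoop, getFinalDeltas_alt]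
  cases hany : nums.any (fun x => decide (x ≠ 0)) with
  | false => simp
  | true =>
    have hne : nums ≠ [] := by
      rcases List.any_eq_true.mp hany with ⟨x, hx, _⟩
      exact List.ne_nil_of_mem hx
    simp only [reduceIte, diff_range_eq nums hne, diff_zip_eq nums]
    cases hm : PySem.List.pyGet? (List.zipWith (fun a b => b - a) nums nums.tail) (-1) with
    | none => simp
    | some x =>
      simp [loop_eq_alt (List.zipWith (fun a b => b - a) nums nums.tail) (deltas ++ [x])]
termination_by nums.length
decreasing_by
  · have hne' : nums ≠ [] := hne
    have : 1 ≤ nums.length := List.length_pos_iff.mpr hne'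
    simp only [List.length_zipWith, List.length_tail]
    omega

-- ===== VERDICT (by name: the statement is the Claim_ definition above) =====
theorem getFinalDeltas_spec : Claim_equal_getFinalDeltas := by
  intro nums _ _
  unfold Spec_getFinalDeltas getFinalDeltas
  simpa using loop_eq_alt nums []
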